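-- pv_equiv track=rewrite | github.com/weekyear/algorithm | 2021/04/15/prgrammars_02.py | checkString
-- ===== SOURCE A (Python) =====
-- def checkString(cur_str):
--     a_stack = 0
--     b_stack = 0
--     c_stack = 0
--
--     for s in cur_str:
--         if s == '(':
--             a_stack += 1
--         elif s == '[':
--             b_stack += 1
--         elif s == '{':
--             c_stack += 1
--         elif s == ')':
--             a_stack -= 1
--         elif s == ']':
--             b_stack -= 1
--         elif s == '}':
--             c_stack -= 1
--
--         if a_stack < 0 or b_stack < 0 or c_stack < 0:
--             return False
--
--     if a_stack == b_stack == c_stack == 0: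
--         return True
--
--     return False
-- ===== SOURCE B (Python) =====
-- def balanced(s, open_ch, close_ch):
--     depth = 0
--     for ch in s:
--         if ch == open_ch:
--             depth += 1
--         elif ch == close_ch:
--             depth -= 1
--         if depth < 0:
--             return False
--     return depth == 0
--
-- def checkString(cur_str):
--     return all(balanced(cur_str, o, c) for o, c in [('(', ')'), ('[', ']'), ('{', '}')])
-- ===== Notes on version B (the rewrite author's own statement) =====
-- stated objective: simpler
-- what changed: Replaces the fused single pass over three counters with a reusable helper balanced(s, open, close) applied independently once per bracket type.
import Mathlib
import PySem

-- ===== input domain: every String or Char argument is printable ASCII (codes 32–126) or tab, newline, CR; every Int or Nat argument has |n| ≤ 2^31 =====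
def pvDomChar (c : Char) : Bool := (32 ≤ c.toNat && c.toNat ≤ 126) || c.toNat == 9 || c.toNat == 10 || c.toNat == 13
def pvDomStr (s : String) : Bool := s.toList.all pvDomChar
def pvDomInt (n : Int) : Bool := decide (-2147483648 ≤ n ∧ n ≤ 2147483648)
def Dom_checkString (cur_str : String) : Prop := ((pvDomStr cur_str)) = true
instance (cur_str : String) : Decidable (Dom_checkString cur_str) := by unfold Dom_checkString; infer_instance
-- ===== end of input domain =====

-- B re-decomposes A's fused three-counter pass into a reusable per-bracket-type helper run three times; objective: simpler.

-- ===== PORT A =====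
-- the fused loop of A: one char updates at most one of the three counters (elif chain), early False on any negative
def checkStringGo : List Char → Int → Int → Int → Bool
  | [], a, b, c => a == 0 && b == 0 && c == 0
  | s :: rest, a, b, c =>
    let t : Int × Int × Int :=
      if s == '(' then (a + 1, b, c)
      else if s == '[' then (a, b + 1, c)
      else if s == '{' then (a, b, c + 1)
      else if s == ')' then (a - 1, b, c)
      else if s == ']' then (a, b - 1, c)
      else if s == '}' then (a, b, c - 1)
      else (a, b, c)
    if t.1 < 0 || t.2.1 < 0 || t.2.2 < 0 then false
    else checkStringGo rest t.1 t.2.1 t.2.2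

def checkString (cur_str : String) : Bool :=
  checkStringGo cur_str.toList 0 0 0

-- ===== PORT B =====
-- helper: scan once, +1 on open_ch, -1 on close_ch, False if depth goes negative, depth == 0 at the end
def balanced : List Char → Char → Char → Int → Bool
  | [], _, _, depth => depth == 0
  | ch :: rest, open_ch, close_ch, depth =>
    let d := if ch == open_ch then depth + 1
             else if ch == close_ch then depth - 1
             else depth
    if d < 0 then false else balanced rest open_ch close_ch d

def checkString_alt (cur_str : String) : Bool :=
  balanced cur_str.toList '(' ')' 0 &&
  balanced cur_str.toList '[' ']' 0 &&
  balanced cur_str.toList '{' '}' 0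

-- ===== PRECONDITION & SPEC =====
def Spec_checkString (cur_str : String) (out : Bool) : Prop := out = checkString_alt cur_str
instance (cur_str : String) (out : Bool) : Decidable (Spec_checkString cur_str out) := by unfold Spec_checkString; infer_instance

-- ===== CLAIM (what is proved, stated in full; the proofs are below) =====
def Claim_equal_checkString : Prop := ∀ (cur_str : String), Dom_checkString cur_str → Spec_checkString cur_str (checkString cur_str)

-- ===== LEMMAS AND PROOFS =====
theorem checkStringGo_eq (l : List Char) : ∀ (a b c : Int), 0 ≤ a → 0 ≤ b → 0 ≤ c →
    checkStringGo l a b c =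
      (balanced l '(' ')' a && balanced l '[' ']' b && balanced l '{' '}' c) := by
  induction l with
  | nil => intro a b c _ _ _; simp [Bool.and_assoc, Bool.and_comm, Bool.and_left_comm, checkStringGo, balanced]
  | cons s rest ih =>
    intro a b c ha hb hc
    by_cases h1 : s = '('
    · subst h1
      simp [Bool.and_assoc, Bool.and_comm, Bool.and_left_comm, checkStringGo, balanced, (by omega : ¬ a + 1 < 0), (by omega : ¬ b < 0),
        (by omega : ¬ c < 0), ih (a+1) b c (by omega) hb hc]
    by_cases h2 : s = '['
    · subst h2
      simp [Bool.and_assoc, Bool.and_comm, Bool.and_left_comm, checkStringGo, balanced, (by omega : ¬ a < 0), (by omega : ¬ b + 1 < 0),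
        (by omega : ¬ c < 0), ih a (b+1) c ha (by omega) hc]
    by_cases h3 : s = '{'
    · subst h3
      simp [Bool.and_assoc, Bool.and_comm, Bool.and_left_comm, checkStringGo, balanced, (by omega : ¬ a < 0), (by omega : ¬ b < 0),
        (by omega : ¬ c + 1 < 0), ih a b (c+1) ha hb (by omega)]
    by_cases h4 : s = ')'
    · subst h4
      by_cases hneg : a - 1 < 0
      · simp [Bool.and_assoc, Bool.and_comm, Bool.and_left_comm, checkStringGo, balanced, hneg]
      · simp [Bool.and_assoc, Bool.and_comm, Bool.and_left_comm, checkStringGo, balanced, hneg, (by omega : ¬ b < 0), (by omega : ¬ c < 0),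
          ih (a-1) b c (by omega) hb hc]
    by_cases h5 : s = ']'
    · subst h5
      by_cases hneg : b - 1 < 0
      · simp [Bool.and_assoc, Bool.and_comm, Bool.and_left_comm, checkStringGo, balanced, hneg]
      · simp [Bool.and_assoc, Bool.and_comm, Bool.and_left_comm, checkStringGo, balanced, hneg, (by omega : ¬ a < 0), (by omega : ¬ c < 0),
          ih a (b-1) c ha (by omega) hc]
    by_cases h6 : s = '}'
    · subst h6
      by_cases hneg : c - 1 < 0
      · simp [Bool.and_assoc, Bool.and_comm, Bool.and_left_comm, checkStringGo, balanced, hneg]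
      · simp [Bool.and_assoc, Bool.and_comm, Bool.and_left_comm, checkStringGo, balanced, hneg, (by omega : ¬ a < 0), (by omega : ¬ b < 0),
          ih a b (c-1) ha hb (by omega)]
    · simp [Bool.and_assoc, Bool.and_comm, Bool.and_left_comm, checkStringGo, balanced, h1, h2, h3, h4, h5, h6, (by omega : ¬ a < 0),
        (by omega : ¬ b < 0), (by omega : ¬ c < 0), ih a b c ha hb hc]

-- ===== VERDICT (by name: the statement is the Claim_ definition above) =====
theorem checkString_spec : Claim_equal_checkString := by
  intro s _
  unfold Spec_checkString checkString checkString_alt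
  exact checkStringGo_eq s.toList 0 0 0 le_rfl le_rfl le_rfl
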